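-- pv_equiv track=rewrite | github.com/Shivay00001/goatclaw | processor.py | _needs_confirmation
-- ===== SOURCE A (Python) =====
-- from typing import Dict, List, Any
--
-- def _needs_confirmation(commands: List[str]) -> bool:
--     """Determine if commands need user confirmation"""
--     dangerous_keywords = [
--         'rm', 'delete', 'format', 'drop',
--         'truncate', 'destroy', 'remove', 'uninstall'
--     ]
--
--     for cmd in commands:
--         cmd_lower = cmd.lower()
--         if any(kw in cmd_lower for kw in dangerous_keywords):
--             return True
--
--     return False
-- ===== SOURCE B (Python) =====
-- _KEYWORDS = ('rm', 'delete', 'format', 'drop',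
--              'truncate', 'destroy', 'remove', 'uninstall')
--
-- def _needs_confirmation(commands):
--     """Single left-to-right position scan per command: at each index, test
--     whether any dangerous keyword starts there (naive multi-pattern scan)."""
--     for cmd in commands:
--         s = cmd.lower()
--         for i in range(len(s)):
--             if any(s.startswith(kw, i) for kw in _KEYWORDS):
--                 return True
--     return False
-- ===== Notes on version B (the rewrite author's own statement) =====
-- stated objective: alternative
-- what changed: Replaced the keyword-major loop of eight independent substring searches ('kw in cmd_lower') by a position-major single left-to-right scan of each lowercased command that tests at every index whether some keyword starts there (naive multi-pattern scan).
import Mathlib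
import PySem

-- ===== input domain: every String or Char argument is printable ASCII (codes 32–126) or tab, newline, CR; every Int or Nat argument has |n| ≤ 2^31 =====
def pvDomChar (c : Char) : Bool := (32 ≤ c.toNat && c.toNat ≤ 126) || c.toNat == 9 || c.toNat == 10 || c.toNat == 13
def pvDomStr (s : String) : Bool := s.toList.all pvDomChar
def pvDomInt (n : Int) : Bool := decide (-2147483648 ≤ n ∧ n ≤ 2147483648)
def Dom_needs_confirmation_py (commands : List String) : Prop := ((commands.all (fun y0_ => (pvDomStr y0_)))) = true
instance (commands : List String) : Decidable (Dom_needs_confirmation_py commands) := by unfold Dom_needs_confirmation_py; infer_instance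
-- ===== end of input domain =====

-- B replaces A's keyword-major substring loop by a position-major scan of each command (alternative decomposition, same cost).

-- ===== PORT A =====
def pvKeywords : List String :=
  ["rm", "delete", "format", "drop", "truncate", "destroy", "remove", "uninstall"]

-- the 'for cmd in commands' loop with early 'return True'
def pvALoop : List String → Bool
  | [] => false
  | cmd :: rest =>
    let cmd_lower := PySem.Str.lower cmd
    if pvKeywords.any (fun kw => PySem.Str.isIn kw cmd_lower) then true
    else pvALoop rest

def needs_confirmation_py (commands : List String) : Bool := pvALoop commands

-- ===== PORT B =====
def pvKeywordsB : List (List Char) :=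
  [['r','m'], ['d','e','l','e','t','e'], ['f','o','r','m','a','t'], ['d','r','o','p'],
   ['t','r','u','n','c','a','t','e'], ['d','e','s','t','r','o','y'],
   ['r','e','m','o','v','e'], ['u','n','i','n','s','t','a','l','l']]

-- the inner 'for i in range(len(s))' scan; s.startswith(kw, i) with 0 ≤ i is
-- exactly 'startswith (s.drop i) kw' (hand-ported, exact for 0 ≤ i ≤ len s)
def pvBLoop : List String → Bool
  | [] => false
  | cmd :: rest =>
    let s := PySem.Chars.lower cmd.toList
    if (List.range s.length).any (fun i =>
         pvKeywordsB.any (fun kw => PySem.Chars.startswith (s.drop i) kw)) then true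
    else pvBLoop rest

def needs_confirmation_py_alt (commands : List String) : Bool := pvBLoop commands

-- ===== PRECONDITION & SPEC =====
def Spec_needs_confirmation_py (commands : List String) (out : Bool) : Prop := out = needs_confirmation_py_alt commands
instance (commands : List String) (out : Bool) : Decidable (Spec_needs_confirmation_py commands out) := by unfold Spec_needs_confirmation_py; infer_instance

-- ===== CLAIM (what is proved, stated in full; the proofs are below) =====
def Claim_equal_needs_confirmation_py : Prop := ∀ (commands : List String), Dom_needs_confirmation_py commands → Spec_needs_confirmation_py commands (needs_confirmation_py commands)

-- ===== LEMMAS AND PROOFS =====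

theorem pvKeywordsB_ne_nil : ∀ kw ∈ pvKeywordsB, kw ≠ [] := by decide

-- per-string: position-major scan = keyword-major substring test
theorem pv_inner_eq (s : List Char) :
    ((List.range s.length).any (fun i =>
       pvKeywordsB.any (fun kw => PySem.Chars.startswith (s.drop i) kw)))
    = pvKeywordsB.any (fun kw => PySem.Chars.isIn kw s) := by
  apply Bool.eq_iff_iff.mpr
  simp only [List.any_eq_true, List.mem_range, PySem.Chars.startswith_iff,
    PySem.Chars.isIn_iff_infix]
  constructor
  · rintro ⟨i, _, kw, hkw, hpre⟩
    exact ⟨kw, hkw, (PySem.Chars.isIn_iff_infix kw s).mp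
      ((PySem.Chars.exists_prefix_drop_iff_isIn kw s).mp ⟨i, hpre⟩)⟩
  · rintro ⟨kw, hkw, hinf⟩
    have hin : PySem.Chars.isIn kw s = true := (PySem.Chars.isIn_iff_infix kw s).mpr hinf
    obtain ⟨j, hpre⟩ := (PySem.Chars.exists_prefix_drop_iff_isIn kw s).mpr hin
    have hne : kw ≠ [] := pvKeywordsB_ne_nil kw hkw
    have hj : j < s.length := by
      by_contra h
      have : s.drop j = [] := List.drop_eq_nil_of_le (by omega)
      rw [this] at hpre
      exact hne (List.prefix_nil.mp hpre)
    exact ⟨j, hj, kw, hkw, hpre⟩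

-- per-string: A's test on Str equals B's test on Chars
theorem pv_head_eq (cmd : String) :
    pvKeywords.any (fun kw => PySem.Str.isIn kw (PySem.Str.lower cmd))
    = pvKeywordsB.any (fun kw => PySem.Chars.isIn kw (PySem.Chars.lower cmd.toList)) := by
  simp only [pvKeywords, pvKeywordsB, List.any_cons, List.any_nil,
    PySem.Str.isIn, PySem.Str.toList_lower]
  rfl

theorem pv_loops_eq (commands : List String) : pvALoop commands = pvBLoop commands := by
  induction commands with
  | nil => rfl
  | cons cmd rest ih =>
    simp only [pvALoop, pvBLoop, pv_inner_eq, pv_head_eq, ih]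

-- ===== VERDICT (by name: the statement is the Claim_ definition above) =====
theorem needs_confirmation_py_spec : Claim_equal_needs_confirmation_py := by
  intro commands _
  unfold Spec_needs_confirmation_py needs_confirmation_py needs_confirmation_py_alt
  exact pv_loops_eq commands
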